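-- pv_equiv track=rewrite | github.com/IvanYachUkr/Tessera | rust_features/production_scr/pipeline.py | _farthest_point_seeds
-- ===== SOURCE A (Python) =====
-- def _tile_manhattan(t1, t2, n_tile_cols):
--     """Manhattan distance between two tiles."""
--     r1, c1 = t1 // n_tile_cols, t1 % n_tile_cols
--     r2, c2 = t2 // n_tile_cols, t2 % n_tile_cols
--     return abs(r1 - r2) + abs(c1 - c2)
--
-- def _farthest_point_seeds(unique_tiles, n_folds, n_tile_cols, start_tile):
--     """Pick K seed tiles maximally spread via greedy farthest-point."""
--     seeds = [start_tile]
--     for _ in range(1, n_folds):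
--         best_tile, best_min_dist = None, -1
--         for t in unique_tiles:
--             if t in seeds:
--                 continue
--             min_d = min(_tile_manhattan(t, s, n_tile_cols) for s in seeds)
--             if min_d > best_min_dist:
--                 best_min_dist = min_d
--                 best_tile = t
--         seeds.append(best_tile)
--     return seeds
-- ===== SOURCE B (Python) =====
-- def _tile_manhattan(t1, t2, n_tile_cols):
--     """Manhattan distance between two tiles."""
--     r1, c1 = t1 // n_tile_cols, t1 % n_tile_cols
--     r2, c2 = t2 // n_tile_cols, t2 % n_tile_cols
--     return abs(r1 - r2) + abs(c1 - c2)
--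
-- def _farthest_point_seeds(unique_tiles, n_folds, n_tile_cols, start_tile):
--     """Greedy farthest-point seeds; keeps an incremental nearest-seed
--     distance array (updated once per new seed) instead of re-scanning
--     all seeds for every tile."""
--     seeds = [start_tile]
--     chosen = {start_tile}
--     dist = [None] * len(unique_tiles)  # nearest-seed distance, filled incrementally
--     new_seed = start_tile
--     for _ in range(1, n_folds):
--         if new_seed is not None:
--             for i, t in enumerate(unique_tiles):
--                 if t not in chosen:
--                     d = _tile_manhattan(t, new_seed, n_tile_cols)
--                     if dist[i] is None or d < dist[i]:
--                         dist[i] = d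
--         best, best_d = None, -1
--         for i, t in enumerate(unique_tiles):
--             if t not in chosen and dist[i] > best_d:
--                 best, best_d = t, dist[i]
--         seeds.append(best)
--         chosen.add(best)
--         new_seed = best
--     return seeds
-- ===== Notes on version B (the rewrite author's own statement) =====
-- stated objective: faster
-- what changed: Instead of recomputing, for every candidate tile in every round, the min distance over all seeds picked so far (O(K^2*N)), B maintains a nearest-seed distance array plus a chosen set and updates each tile's distance once per newly added seed (O(K*N)).
import Mathlib
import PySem

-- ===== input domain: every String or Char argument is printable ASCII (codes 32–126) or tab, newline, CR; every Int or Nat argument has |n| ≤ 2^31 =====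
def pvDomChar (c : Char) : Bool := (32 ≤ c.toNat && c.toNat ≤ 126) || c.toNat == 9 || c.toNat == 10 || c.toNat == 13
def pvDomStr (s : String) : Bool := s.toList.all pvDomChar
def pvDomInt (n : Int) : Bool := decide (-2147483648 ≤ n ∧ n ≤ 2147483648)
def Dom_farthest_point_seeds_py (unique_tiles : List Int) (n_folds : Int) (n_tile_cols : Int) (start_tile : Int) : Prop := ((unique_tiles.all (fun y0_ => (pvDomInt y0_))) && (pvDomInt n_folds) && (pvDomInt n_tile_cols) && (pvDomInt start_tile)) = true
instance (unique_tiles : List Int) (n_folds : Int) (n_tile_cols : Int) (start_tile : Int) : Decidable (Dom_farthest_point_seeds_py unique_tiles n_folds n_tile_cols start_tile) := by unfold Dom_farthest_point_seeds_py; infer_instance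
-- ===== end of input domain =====

-- B replaces A's per-round rescan of all seeds (O(K^2*N)) by an incremental
-- nearest-seed distance array updated once per new seed (O(K*N)); objective: faster.

-- ===== PORT A =====

-- _tile_manhattan (Python // and % via PySem; n_tile_cols = 0 raises in Python, excluded by Pre_)
def pvManhattan (t1 t2 c : Int) : Int :=
  |PySem.Int.floordiv t1 c - PySem.Int.floordiv t2 c| +
  |PySem.Int.mod t1 c - PySem.Int.mod t2 c|

-- distance from tile t to a seed; a seed None is unreachable in Python executions
-- (Python would raise TypeError inside _tile_manhattan); the port returns 0 there
def pvDistO (t : Int) (s : Option Int) (c : Int) : Int :=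
  match s with
  | some v => pvManhattan t v c
  | none => 0

-- min(_tile_manhattan(t, s, c) for s in seeds); seeds is never empty
def pvMinD (t : Int) (seeds : List (Option Int)) (c : Int) : Int :=
  match seeds with
  | [] => 0
  | s :: rest => rest.foldl (fun m s' => min m (pvDistO t s' c)) (pvDistO t s c)

-- body of A's inner 'for t in unique_tiles' loop (state = (best_tile, best_min_dist))
def pvFA (c : Int) (seeds : List (Option Int)) (st : Option Int × Int) (t : Int) :
    Option Int × Int :=
  if some t ∈ seeds then st
  else
    let md := pvMinD t seeds c
    if md > st.2 then (some t, md) else st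

def pvRoundA (ut : List Int) (c : Int) (seeds : List (Option Int)) : Option Int :=
  (ut.foldl (pvFA c seeds) ((none : Option Int), (-1 : Int))).1

def farthest_point_seeds_py (unique_tiles : List Int) (n_folds : Int) (n_tile_cols : Int) (start_tile : Int) : List (Option Int) :=
  (PySem.List.pyRange 1 n_folds 1).foldl
    (fun seeds _ => seeds ++ [pvRoundA unique_tiles n_tile_cols seeds])
    [some start_tile]

-- ===== PORT B =====

-- 'for i, t in enumerate(unique_tiles): if t not in chosen: d = ...; if dist[i] is None or d < dist[i]: dist[i] = d'
def pvUpdB (ut : List Int) (c : Int) (chosen : List (Option Int)) (ns : Int)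
    (dist : List (Option Int)) : List (Option Int) :=
  (ut.zip dist).map (fun p =>
    if some p.1 ∈ chosen then p.2
    else
      let d := pvManhattan p.1 ns c
      match p.2 with
      | none => some d
      | some m => if d < m then some d else some m)

-- body of B's selection loop
def pvFB (chosen : List (Option Int)) (st : Option Int × Int) (p : Int × Option Int) :
    Option Int × Int :=
  if some p.1 ∈ chosen then st
  else
    match p.2 with
    | none => st   -- unreachable in Python executions (dist[i] is filled before use)
    | some dv => if dv > st.2 then (some p.1, dv) else st

def pvSelB (ut : List Int) (chosen : List (Option Int)) (dist : List (Option Int)) :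
    Option Int × Int :=
  (ut.zip dist).foldl (pvFB chosen) ((none : Option Int), (-1 : Int))

-- one loop iteration; state = (seeds, chosen, dist, new_seed)
def pvStepB (ut : List Int) (c : Int)
    (st : List (Option Int) × List (Option Int) × List (Option Int) × Option Int) :
    List (Option Int) × List (Option Int) × List (Option Int) × Option Int :=
  let dist := match st.2.2.2 with
    | none => st.2.2.1
    | some ns => pvUpdB ut c st.2.1 ns st.2.2.1
  let best := (pvSelB ut st.2.1 dist).1
  (st.1 ++ [best], PySem.Set.add st.2.1 best, dist, best)

def farthest_point_seeds_py_alt (unique_tiles : List Int) (n_folds : Int) (n_tile_cols : Int) (start_tile : Int) : List (Option Int) :=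
  ((PySem.List.pyRange 1 n_folds 1).foldl
    (fun st _ => pvStepB unique_tiles n_tile_cols st)
    ([some start_tile], PySem.Set.ofList [some start_tile],
      unique_tiles.map (fun _ => (none : Option Int)), some start_tile)).1

-- ===== PRECONDITION & SPEC =====
-- Pre_ excludes exactly the inputs on which the Python A raises ZeroDivisionError
-- (n_tile_cols = 0 while a distance is actually computed, i.e. n_folds ≥ 2 and some
-- tile differs from start_tile); B raises there too.
def Pre_farthest_point_seeds_py (unique_tiles : List Int) (n_folds : Int) (n_tile_cols : Int) (start_tile : Int) : Prop :=
  n_tile_cols ≠ 0 ∨ n_folds ≤ 1 ∨ ∀ t ∈ unique_tiles, t = start_tile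
instance (unique_tiles : List Int) (n_folds : Int) (n_tile_cols : Int) (start_tile : Int) : Decidable (Pre_farthest_point_seeds_py unique_tiles n_folds n_tile_cols start_tile) := by unfold Pre_farthest_point_seeds_py; infer_instance

def pvWitness_farthest_point_seeds_py : List Int × Int × Int × Int := ([0, 1, 2, 3], 2, 2, 0)

def Spec_farthest_point_seeds_py (unique_tiles : List Int) (n_folds : Int) (n_tile_cols : Int) (start_tile : Int) (out : List (Option Int)) : Prop := out = farthest_point_seeds_py_alt unique_tiles n_folds n_tile_cols start_tile
instance (unique_tiles : List Int) (n_folds : Int) (n_tile_cols : Int) (start_tile : Int) (out : List (Option Int)) : Decidable (Spec_farthest_point_seeds_py unique_tiles n_folds n_tile_cols start_tile out) := by unfold Spec_farthest_point_seeds_py; infer_instance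

-- ===== CLAIM (what is proved, stated in full; the proofs are below) =====
def Claim_equal_farthest_point_seeds_py : Prop := ∀ (unique_tiles : List Int) (n_folds : Int) (n_tile_cols : Int) (start_tile : Int), Dom_farthest_point_seeds_py unique_tiles n_folds n_tile_cols start_tile → Pre_farthest_point_seeds_py unique_tiles n_folds n_tile_cols start_tile → Spec_farthest_point_seeds_py unique_tiles n_folds n_tile_cols start_tile (farthest_point_seeds_py unique_tiles n_folds n_tile_cols start_tile)

-- ===== LEMMAS AND PROOFS =====

def pvInv (ut : List Int) (c : Int)
    (st : List (Option Int) × List (Option Int) × List (Option Int) × Option Int) : Prop :=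
  (∀ x, x ∈ st.2.1 ↔ x ∈ st.1) ∧
  st.1.getLast? = some st.2.2.2 ∧
  st.2.2.1.length = ut.length ∧
  (∀ i, i < ut.length → some (ut.getD i 0) ∉ st.1 →
    st.2.2.1.getD i none =
      if st.1.dropLast = [] then none
      else some (pvMinD (ut.getD i 0) st.1.dropLast c)) ∧
  ((none : Option Int) ∈ st.1 → ∀ t ∈ ut, some t ∈ st.1)

theorem pv_distO_nonneg (t : Int) (s : Option Int) (c : Int) : 0 ≤ pvDistO t s c := by
  cases s with
  | none => simp [pvDistO]
  | some v => simp only [pvDistO, pvManhattan]; positivity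

theorem pv_foldl_min_nonneg (t c : Int) (l : List (Option Int)) (m : Int) (hm : 0 ≤ m) :
    0 ≤ l.foldl (fun m s' => min m (pvDistO t s' c)) m := by
  induction l generalizing m with
  | nil => exact hm
  | cons s rest ih => exact ih _ (le_min hm (pv_distO_nonneg t s c))

theorem pv_minD_nonneg (t : Int) (seeds : List (Option Int)) (c : Int) :
    0 ≤ pvMinD t seeds c := by
  cases seeds with
  | nil => simp [pvMinD]
  | cons s rest => exact pv_foldl_min_nonneg t c rest _ (pv_distO_nonneg t s c)

theorem pv_minD_concat (t c : Int) (l : List (Option Int)) (s : Option Int) (h : l ≠ []) :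
    pvMinD t (l ++ [s]) c = min (pvMinD t l c) (pvDistO t s c) := by
  cases l with
  | nil => exact absurd rfl h
  | cons a rest => simp [pvMinD, List.foldl_append]

theorem pv_fa_skip (c : Int) (seeds : List (Option Int)) (ut : List Int)
    (h : ∀ t ∈ ut, some t ∈ seeds) (st : Option Int × Int) :
    ut.foldl (pvFA c seeds) st = st := by
  induction ut generalizing st with
  | nil => rfl
  | cons t rest ih =>
    simp only [List.foldl_cons, pvFA, if_pos (h t (by simp))]
    exact ih (fun x hx => h x (by simp [hx])) st

theorem pv_fb_skip (chosen : List (Option Int)) (l : List (Int × Option Int))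
    (h : ∀ p ∈ l, some p.1 ∈ chosen) (st : Option Int × Int) :
    l.foldl (pvFB chosen) st = st := by
  induction l generalizing st with
  | nil => rfl
  | cons p rest ih =>
    simp only [List.foldl_cons, pvFB, if_pos (h p (by simp))]
    exact ih (fun x hx => h x (by simp [hx])) st

theorem pv_fa_keep_some (c : Int) (seeds : List (Option Int)) (ut : List Int)
    (st : Option Int × Int) (h : st.1 ≠ none) :
    (ut.foldl (pvFA c seeds) st).1 ≠ none := by
  induction ut generalizing st with
  | nil => exact h
  | cons t rest ih =>
    simp only [List.foldl_cons, pvFA]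
    split_ifs <;> [exact ih st h; exact ih _ (by simp); exact ih st h]

theorem pv_fa_some_of_exists (c : Int) (seeds : List (Option Int)) (ut : List Int)
    (st : Option Int × Int) (hst : st.1 = none → st.2 = -1)
    (h : ∃ t ∈ ut, some t ∉ seeds) :
    (ut.foldl (pvFA c seeds) st).1 ≠ none := by
  induction ut generalizing st with
  | nil => simp at h
  | cons t rest ih =>
    simp only [List.foldl_cons, pvFA]
    by_cases hmem : some t ∈ seeds
    · rw [if_pos hmem]
      obtain ⟨u, hu, hus⟩ := h
      rcases List.mem_cons.mp hu with rfl | hu'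
      · exact absurd hmem hus
      · exact ih st hst ⟨u, hu', hus⟩
    · rw [if_neg hmem]
      by_cases hgt : pvMinD t seeds c > st.2
      · rw [if_pos hgt]
        exact pv_fa_keep_some c seeds rest _ (by simp)
      · rw [if_neg hgt]
        apply pv_fa_keep_some c seeds rest st
        intro hnone
        have := hst hnone
        have := pv_minD_nonneg t seeds c
        omega

theorem pv_sel_eq (c : Int) (seeds chosen : List (Option Int))
    (hch : ∀ x, x ∈ chosen ↔ x ∈ seeds) :
    ∀ (ut : List Int) (dist : List (Option Int)) (st : Option Int × Int),
    dist.length = ut.length →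
    (∀ i, i < ut.length → some (ut.getD i 0) ∉ seeds →
      dist.getD i none = some (pvMinD (ut.getD i 0) seeds c)) →
    (ut.zip dist).foldl (pvFB chosen) st = ut.foldl (pvFA c seeds) st := by
  intro ut
  induction ut with
  | nil => intro dist st _ _; simp
  | cons t rest ih =>
    intro dist st hlen hd
    cases dist with
    | nil => simp at hlen
    | cons d0 dist' =>
      simp only [List.zip_cons_cons, List.foldl_cons]
      have hstep : pvFB chosen st (t, d0) = pvFA c seeds st t := by
        simp only [pvFB, pvFA, hch]
        by_cases hmem : some t ∈ seeds
        · simp [hmem]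
        · have h0 := hd 0 (by simp) (by simpa using hmem)
          simp only [List.getD_cons_zero] at h0
          simp [hmem, h0]
      rw [hstep]
      exact ih dist' _ (by simpa using hlen)
        (fun i hi hni => by
          have := hd (i + 1) (by simpa using hi) (by simpa using hni)
          simpa using this)

theorem pv_upd_length (ut : List Int) (c : Int) (chosen : List (Option Int)) (ns : Int)
    (dist : List (Option Int)) (hlen : dist.length = ut.length) :
    (pvUpdB ut c chosen ns dist).length = ut.length := by
  simp [pvUpdB, hlen]

theorem pv_upd_getD (ut : List Int) (c : Int) (chosen : List (Option Int)) (ns : Int)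
    (dist : List (Option Int)) (i : Nat) (hi : i < ut.length) (hlen : dist.length = ut.length) :
    (pvUpdB ut c chosen ns dist).getD i none =
      (if some (ut.getD i 0) ∈ chosen then dist.getD i none
       else
        match dist.getD i none with
        | none => some (pvManhattan (ut.getD i 0) ns c)
        | some m => if pvManhattan (ut.getD i 0) ns c < m then some (pvManhattan (ut.getD i 0) ns c) else some m) := by
  have hm : i < (pvUpdB ut c chosen ns dist).length := by
    simpa [pv_upd_length ut c chosen ns dist hlen] using hi
  rw [List.getD_eq_getElem _ _ hm]
  have h1 := List.getD_eq_getElem ut 0 hi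
  have h2 := List.getD_eq_getElem dist none (by omega : i < dist.length)
  simp only [pvUpdB, List.getElem_map, List.getElem_zip, h1, h2]

theorem pv_getD_map_none (l : List Int) (i : Nat) :
    (l.map (fun _ => (none : Option Int))).getD i none = none := by
  rw [List.getD_eq_getElem?_getD, List.getElem?_map]
  cases l[i]? <;> simp

theorem pv_step (ut : List Int) (c : Int)
    (st : List (Option Int) × List (Option Int) × List (Option Int) × Option Int)
    (h : pvInv ut c st) :
    (pvStepB ut c st).1 = st.1 ++ [pvRoundA ut c st.1] ∧ pvInv ut c (pvStepB ut c st) := by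
  obtain ⟨seeds, chosen, dist, ns⟩ := st
  obtain ⟨hch, hlast, hlen, hd, hcl⟩ := h
  simp only at hch hlast hlen hd hcl
  have hne : seeds ≠ [] := List.ne_nil_of_mem (List.mem_of_getLast? hlast)
  have hsplit : seeds.dropLast ++ [ns] = seeds := List.dropLast_append_getLast? ns hlast
  cases ns with
  | none =>
    -- last seed is None: no candidates remain, both sides append None
    have hnone : (none : Option Int) ∈ seeds := List.mem_of_getLast? hlast
    have hall := hcl hnone
    have hbest : (pvSelB ut chosen dist).1 = none := by
      unfold pvSelB
      rw [pv_fb_skip chosen _ (fun p hp => (hch _).mpr (hall p.1 (List.of_mem_zip hp).1))]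
    have hround : pvRoundA ut c seeds = none := by
      unfold pvRoundA
      rw [pv_fa_skip c seeds ut hall]
    have hstB : pvStepB ut c (seeds, chosen, dist, none)
        = (seeds ++ [none], PySem.Set.add chosen none, dist, none) := by
      simp [pvStepB, hbest]
    rw [hstB, hround]
    refine ⟨rfl, ?_, ?_, ?_, ?_, ?_⟩
    · intro x
      simp only [PySem.Set.mem_add, hch, List.mem_append, List.mem_singleton]
    · exact List.getLast?_concat
    · exact hlen
    · intro i hi hni
      exact absurd (List.mem_append.mpr (Or.inl (hall _ (by
        rw [List.getD_eq_getElem ut 0 hi]; exact List.getElem_mem hi)))) hni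
    · intro _ t ht
      exact List.mem_append.mpr (Or.inl (hall t ht))
  | some v =>
    have hlen' : (pvUpdB ut c chosen v dist).length = ut.length :=
      pv_upd_length ut c chosen v dist hlen
    have hud : ∀ i, i < ut.length → some (ut.getD i 0) ∉ seeds →
        (pvUpdB ut c chosen v dist).getD i none = some (pvMinD (ut.getD i 0) seeds c) := by
      intro i hi hni
      rw [pv_upd_getD ut c chosen v dist i hi hlen]
      rw [if_neg (fun hc => hni ((hch _).mp hc))]
      have hdi := hd i hi hni
      by_cases hdl : seeds.dropLast = []
      · have hseeds : seeds = [some v] := by rw [← hsplit, hdl]; rfl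
        rw [hdi, if_pos hdl]
        simp [hseeds, pvMinD, pvDistO]
      · rw [hdi, if_neg hdl]
        have hmin : pvMinD (ut.getD i 0) seeds c =
            min (pvMinD (ut.getD i 0) seeds.dropLast c) (pvDistO (ut.getD i 0) (some v) c) := by
          conv_lhs => rw [← hsplit]
          exact pv_minD_concat _ c _ _ hdl
        rw [hmin]
        simp only [pvDistO]
        rcases lt_or_ge (pvManhattan (ut.getD i 0) v c) (pvMinD (ut.getD i 0) seeds.dropLast c) with hlt | hge
        · rw [if_pos hlt, min_eq_right (le_of_lt hlt)]
        · rw [if_neg (not_lt.mpr hge), min_eq_left hge]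
    have hbest : (pvSelB ut chosen (pvUpdB ut c chosen v dist)).1 = pvRoundA ut c seeds := by
      unfold pvSelB pvRoundA
      rw [pv_sel_eq c seeds chosen hch ut _ _ hlen' hud]
    have hstB : pvStepB ut c (seeds, chosen, dist, some v)
        = (seeds ++ [pvRoundA ut c seeds], PySem.Set.add chosen (pvRoundA ut c seeds),
            pvUpdB ut c chosen v dist, pvRoundA ut c seeds) := by
      simp [pvStepB, hbest]
    rw [hstB]
    refine ⟨rfl, ?_, ?_, ?_, ?_, ?_⟩
    · intro x
      simp only [PySem.Set.mem_add, hch, List.mem_append, List.mem_singleton]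
    · exact List.getLast?_concat
    · exact hlen'
    · intro i hi hni
      rw [List.dropLast_concat, if_neg hne]
      exact hud i hi (fun hc => hni (List.mem_append.mpr (Or.inl hc)))
    · intro hn t ht
      by_cases hts : some t ∈ seeds
      · exact List.mem_append.mpr (Or.inl hts)
      · rcases List.mem_append.mp hn with hn1 | hn1
        · exact List.mem_append.mpr (Or.inl (hcl hn1 t ht))
        · exact absurd (List.mem_singleton.mp hn1).symm
            (pv_fa_some_of_exists c seeds ut _ (fun _ => rfl) ⟨t, ht, hts⟩)

theorem pv_loop (ut : List Int) (c : Int) (l : List Int) :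
    ∀ (st : List (Option Int) × List (Option Int) × List (Option Int) × Option Int),
    pvInv ut c st →
    (l.foldl (fun s _ => pvStepB ut c s) st).1
      = l.foldl (fun s _ => s ++ [pvRoundA ut c s]) st.1 ∧
    pvInv ut c (l.foldl (fun s _ => pvStepB ut c s) st) := by
  induction l with
  | nil => intro st h; exact ⟨rfl, h⟩
  | cons a rest ih =>
    intro st h
    obtain ⟨h1, h2⟩ := pv_step ut c st h
    simp only [List.foldl_cons]
    obtain ⟨ih1, ih2⟩ := ih _ h2
    exact ⟨by rw [ih1, h1], ih2⟩

theorem pv_inv_init (ut : List Int) (c s0 : Int) :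
    pvInv ut c ([some s0], PySem.Set.ofList [some s0],
      ut.map (fun _ => (none : Option Int)), some s0) := by
  refine ⟨?_, rfl, by simp, ?_, by simp⟩
  · intro x; rw [PySem.Set.mem_ofList]
  · intro i hi _
    simp only [List.dropLast_singleton]
    exact pv_getD_map_none ut i

-- ===== VERDICT (by name: the statement is the Claim_ definition above) =====
theorem farthest_point_seeds_py_spec : Claim_equal_farthest_point_seeds_py := by
  intro ut nf c s0 _ _
  unfold Spec_farthest_point_seeds_py farthest_point_seeds_py farthest_point_seeds_py_alt
  exact ((pv_loop ut c (PySem.List.pyRange 1 nf 1) _ (pv_inv_init ut c s0)).1).symm
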